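-- pv_equiv track=rewrite | github.com/jkassemi/m17 | context.py | strip_toml_tests
-- ===== SOURCE A (Python) =====
-- def strip_toml_tests(content: str) -> str:
--     """
--     Strip common test-only sections from Cargo.toml-like files:
--     - [dev-dependencies]
--     - [target.'cfg(test)'.dependencies]
--     """
--     lines = content.splitlines()
--     out: list[str] = []
--     i = 0
--     n = len(lines)
--
--     while i < n:
--         line = lines[i]
--         stripped = line.strip()
--
--         if stripped.startswith("[") and stripped.endswith("]"):
--             section_name = stripped[1:-1].strip().strip('"').strip("'")
--             if (
--                 section_name == "dev-dependencies"
--                 or section_name.startswith("target.'cfg(test)'.")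
--             ):
--                 # Skip lines until next section header or EOF
--                 i += 1
--                 while i < n:
--                     next_line = lines[i].strip()
--                     if next_line.startswith("[") and next_line.endswith("]"):
--                         break
--                     i += 1
--                 continue
--
--         out.append(line)
--         i += 1
--
--     return "\n".join(out)
-- ===== SOURCE B (Python) =====
-- def strip_toml_tests(content: str) -> str:
--     out: list[str] = []
--     skipping = False
--     for line in content.splitlines():
--         stripped = line.strip()
--         if stripped.startswith("[") and stripped.endswith("]"):
--             name = stripped[1:-1].strip().strip('"').strip("'")
--             skipping = (
--                 name == "dev-dependencies"
--                 or name.startswith("target.'cfg(test)'.")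
--             )
--         if not skipping:
--             out.append(line)
--     return "\n".join(out)
-- ===== Notes on version B (the rewrite author's own statement) =====
-- stated objective: simpler
-- what changed: Replaced A's nested index-based inner skip loop with a single flat pass over the lines carrying a boolean skipping flag that is re-evaluated at every section header.
import Mathlib
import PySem

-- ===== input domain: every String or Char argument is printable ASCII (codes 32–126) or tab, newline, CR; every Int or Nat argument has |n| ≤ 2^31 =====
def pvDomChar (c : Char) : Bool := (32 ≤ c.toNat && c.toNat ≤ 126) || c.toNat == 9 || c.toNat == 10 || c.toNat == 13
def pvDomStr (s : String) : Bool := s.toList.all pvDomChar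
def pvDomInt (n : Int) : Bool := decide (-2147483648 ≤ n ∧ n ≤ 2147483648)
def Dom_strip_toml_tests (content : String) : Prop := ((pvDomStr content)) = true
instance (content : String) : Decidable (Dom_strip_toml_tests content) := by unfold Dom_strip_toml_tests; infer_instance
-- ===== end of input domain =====

-- B replaces A's nested index-based skip loop with one flat pass that carries a boolean
-- `skipping` flag re-evaluated at every section header (objective: simpler).

-- ===== PORT A =====
-- "stripped.startswith('[') and stripped.endswith(']')"
def pvHeaderA (stripped : String) : Bool :=
  PySem.Str.startswith stripped "[" && PySem.Str.endswith stripped "]"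

-- "stripped[1:-1].strip().strip('\"').strip(\"'\")"
def pvNameA (stripped : String) : String :=
  PySem.Str.stripChars
    (PySem.Str.stripChars (PySem.Str.strip (PySem.Str.slice stripped (some 1) (some (-1)))) "\"") "'"

-- "section_name == 'dev-dependencies' or section_name.startswith(\"target.'cfg(test)'.\")"
def pvTestA (name : String) : Bool :=
  name == "dev-dependencies" || PySem.Str.startswith name "target.'cfg(test)'."

-- A's inner "while i < n: … break" loop: advance past body lines to the next header (or EOF)
def pvSkipA : List String → List String
  | [] => []
  | l :: rest => if pvHeaderA (PySem.Str.strip l) then l :: rest else pvSkipA rest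

-- termination measure for pvGoA (the port cites it in decreasing_by)
theorem pvSkipA_length_le (xs : List String) : (pvSkipA xs).length ≤ xs.length := by
  induction xs with
  | nil => simp [pvSkipA]
  | cons l rest ih =>
    simp only [pvSkipA]
    split
    · exact le_refl _
    · exact Nat.le_succ_of_le ih

-- A's outer while-loop over the line index
def pvGoA : List String → List String
  | [] => []
  | line :: rest =>
    if pvHeaderA (PySem.Str.strip line) then
      if pvTestA (pvNameA (PySem.Str.strip line)) then
        pvGoA (pvSkipA rest)
      else
        line :: pvGoA rest
    else
      line :: pvGoA rest
termination_by xs => xs.length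
decreasing_by
  · exact Nat.lt_succ_of_le (pvSkipA_length_le rest)
  · simp
  · simp

def strip_toml_tests (content : String) : String :=
  PySem.Str.join "\n" (pvGoA (PySem.Str.splitlines content))

-- ===== PORT B =====
-- one step of B's flat loop: recompute the flag on a header, append when not skipping
def pvStepB (st : Bool × List String) (line : String) : Bool × List String :=
  let stripped := PySem.Str.strip line
  let skipping :=
    if PySem.Str.startswith stripped "[" && PySem.Str.endswith stripped "]" then
      let name := PySem.Str.stripChars
        (PySem.Str.stripChars (PySem.Str.strip (PySem.Str.slice stripped (some 1) (some (-1)))) "\"") "'"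
      name == "dev-dependencies" || PySem.Str.startswith name "target.'cfg(test)'."
    else st.1
  (skipping, if skipping then st.2 else st.2 ++ [line])

def strip_toml_tests_alt (content : String) : String :=
  PySem.Str.join "\n" (((PySem.Str.splitlines content).foldl pvStepB (false, [])).2)

-- ===== PRECONDITION & SPEC =====
def Spec_strip_toml_tests (content : String) (out : String) : Prop := out = strip_toml_tests_alt content
instance (content : String) (out : String) : Decidable (Spec_strip_toml_tests content out) := by unfold Spec_strip_toml_tests; infer_instance

-- ===== CLAIM (what is proved, stated in full; the proofs are below) =====
def Claim_equal_strip_toml_tests : Prop := ∀ (content : String), Dom_strip_toml_tests content → Spec_strip_toml_tests content (strip_toml_tests content)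

-- ===== LEMMAS AND PROOFS =====

-- B's fold step rewritten without `let` (definitionally equal), for rewriting
theorem pvStepB_eq (st : Bool × List String) (line : String) :
    pvStepB st line =
      ((if pvHeaderA (PySem.Str.strip line) then pvTestA (pvNameA (PySem.Str.strip line)) else st.1),
       (if (if pvHeaderA (PySem.Str.strip line) then pvTestA (pvNameA (PySem.Str.strip line)) else st.1)
        then st.2 else st.2 ++ [line])) := rfl

-- accumulator lemma: the collected output is a prefix plus the run from the empty list
theorem pvFoldB_acc (xs : List String) : ∀ (b : Bool) (acc : List String),
    (xs.foldl pvStepB (b, acc)).2 = acc ++ (xs.foldl pvStepB (b, [])).2 := by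
  induction xs with
  | nil => intro b acc; simp
  | cons l rest ih =>
    intro b acc
    simp only [List.foldl_cons, pvStepB_eq]
    by_cases h : (if pvHeaderA (PySem.Str.strip l) then pvTestA (pvNameA (PySem.Str.strip l)) else b) = true
    · simp only [h, if_true]
      rw [ih, ih _ ([] : List String)]
    · simp only [h, Bool.false_eq_true, if_false]
      rw [ih, ih _ ([] ++ [l])]
      simp

-- main invariant: starting B's flag at false matches A's outer loop, and starting it at true
-- matches A's outer loop resumed after A's inner skip loop
theorem pvMain (xs : List String) :
    pvGoA xs = (xs.foldl pvStepB (false, [])).2 ∧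
    pvGoA (pvSkipA xs) = (xs.foldl pvStepB (true, [])).2 := by
  induction xs with
  | nil => constructor <;> simp [pvGoA, pvSkipA]
  | cons l rest ih =>
    by_cases hh : pvHeaderA (PySem.Str.strip l) = true
    · by_cases ht : pvTestA (pvNameA (PySem.Str.strip l)) = true
      · have h1 : pvGoA (l :: rest) = (((l :: rest).foldl pvStepB (false, [])).2) := by
          rw [pvGoA]
          simp only [hh, ht, if_true, List.foldl_cons, pvStepB_eq, if_true]
          rw [pvFoldB_acc]
          simpa using ih.2
        refine ⟨h1, ?_⟩
        simp only [pvSkipA, hh, if_true]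
        rw [h1]
        simp only [List.foldl_cons, pvStepB_eq, hh, ht, if_true]
      · have h1 : pvGoA (l :: rest) = (((l :: rest).foldl pvStepB (false, [])).2) := by
          rw [pvGoA]
          simp only [hh, ht, if_true, List.foldl_cons, pvStepB_eq]
          rw [pvFoldB_acc]
          simpa using ih.1
        refine ⟨h1, ?_⟩
        simp only [pvSkipA, hh, if_true]
        rw [h1]
        simp only [List.foldl_cons, pvStepB_eq, hh, ht, if_true]
    · have hh' : pvHeaderA (PySem.Str.strip l) = false := by
        simpa using hh
      constructor
      · rw [pvGoA]
        simp only [hh', if_false, Bool.false_eq_true, List.foldl_cons, pvStepB_eq]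
        rw [pvFoldB_acc]
        simpa using ih.1
      · simp only [pvSkipA, hh', if_false, Bool.false_eq_true, List.foldl_cons, pvStepB_eq,
          if_true]
        rw [pvFoldB_acc]
        simpa using ih.2

-- ===== VERDICT (by name: the statement is the Claim_ definition above) =====
theorem strip_toml_tests_spec : Claim_equal_strip_toml_tests := by
  intro content _
  unfold Spec_strip_toml_tests strip_toml_tests strip_toml_tests_alt
  rw [(pvMain (PySem.Str.splitlines content)).1]
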